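-- pv_equiv track=rewrite | github.com/gwwctw/latentgee | examples/prototype_updated_phase2.py | build_layer_dims
-- ===== SOURCE A (Python) =====
-- def build_layer_dims(input_dim, base_dim, output_dim, n_layers,  strategy='constant'):
--     dims = [input_dim]
--     current_dim = base_dim
--     for _ in range(n_layers):
--         dims.append(current_dim)
--         if strategy == 'halve':
--             current_dim = max(current_dim // 2, output_dim)
--         elif strategy == 'double':
--             current_dim = min(current_dim * 2, 1024)  # arbitrary upper limit
--         elif strategy == 'constant':
--             continue
--         else:
--             raise ValueError(f"Unknown strategy: {strategy}")
--     dims.append(output_dim)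
--     return dims
-- ===== SOURCE B (Python) =====
-- def build_layer_dims(input_dim, base_dim, output_dim, n_layers, strategy='constant'):
--     def rest(d, k):
--         if k <= 0:
--             return [output_dim]
--         if strategy == 'halve':
--             nxt = max(d // 2, output_dim)
--         elif strategy == 'double':
--             nxt = min(d * 2, 1024)
--         elif strategy == 'constant':
--             nxt = d
--         else:
--             raise ValueError(f"Unknown strategy: {strategy}")
--         return [d] + rest(nxt, k - 1)
--     return [input_dim] + rest(base_dim, n_layers)
-- ===== Notes on version B (the rewrite author's own statement) =====
-- stated objective: alternative
-- what changed: Replaces A's imperative loop with a mutable dims list and current_dim accumulator by a recursive decomposition that builds the tail of the list front-to-back by cons, with no intermediate list state.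
import Mathlib
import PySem

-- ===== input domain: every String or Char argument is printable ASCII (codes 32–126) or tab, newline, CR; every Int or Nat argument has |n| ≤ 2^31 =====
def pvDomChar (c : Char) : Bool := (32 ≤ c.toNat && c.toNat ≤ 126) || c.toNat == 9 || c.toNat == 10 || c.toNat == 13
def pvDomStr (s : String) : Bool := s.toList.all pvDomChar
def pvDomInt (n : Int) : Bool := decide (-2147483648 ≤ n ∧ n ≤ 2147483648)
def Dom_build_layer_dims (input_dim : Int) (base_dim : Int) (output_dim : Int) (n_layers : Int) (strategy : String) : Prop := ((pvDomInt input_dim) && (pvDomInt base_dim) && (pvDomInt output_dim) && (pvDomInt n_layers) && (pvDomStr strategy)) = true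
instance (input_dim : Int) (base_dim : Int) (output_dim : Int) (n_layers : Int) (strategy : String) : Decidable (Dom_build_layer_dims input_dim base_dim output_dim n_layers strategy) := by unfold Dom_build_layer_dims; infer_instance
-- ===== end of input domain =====

-- B replaces A's imperative loop/accumulator with a recursive decomposition building the tail by cons; alternative, not faster.
-- ===== PORT A =====
def build_layer_dims (input_dim : Int) (base_dim : Int) (output_dim : Int) (n_layers : Int) (strategy : String) : List Int :=
  let st := (PySem.List.pyRange 0 n_layers 1).foldl
    (fun (st : List Int × Int) _ =>
      let dims := st.1 ++ [st.2]
      if strategy == "halve" then (dims, max (PySem.Int.floordiv st.2 2) output_dim)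
      else if strategy == "double" then (dims, min (st.2 * 2) 1024)
      else if strategy == "constant" then (dims, st.2)
      else (dims, st.2))  -- Python raises ValueError here; excluded by Pre_
    ([input_dim], base_dim)
  st.1 ++ [output_dim]

-- ===== PORT B =====
-- helper: the recursion `rest(d, k)` of Source B, fuel = k (k <= 0 is the base case, so Nat fuel is exact)
def bld_rest (strategy : String) (output_dim : Int) : Int → Nat → List Int
  | _, 0 => [output_dim]
  | d, Nat.succ k =>
    let nxt :=
      if strategy == "halve" then max (PySem.Int.floordiv d 2) output_dim
      else if strategy == "double" then min (d * 2) 1024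
      else if strategy == "constant" then d
      else d  -- Python raises ValueError here; excluded by Pre_
    d :: bld_rest strategy output_dim nxt k

def build_layer_dims_alt (input_dim : Int) (base_dim : Int) (output_dim : Int) (n_layers : Int) (strategy : String) : List Int :=
  input_dim :: bld_rest strategy output_dim base_dim n_layers.toNat

-- ===== PRECONDITION & SPEC =====
-- Pre_ excludes exactly the inputs where A raises ValueError: an unknown strategy with at least one layer.
def Pre_build_layer_dims (input_dim : Int) (base_dim : Int) (output_dim : Int) (n_layers : Int) (strategy : String) : Prop :=
  strategy = "constant" ∨ strategy = "halve" ∨ strategy = "double" ∨ n_layers ≤ 0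
instance (input_dim : Int) (base_dim : Int) (output_dim : Int) (n_layers : Int) (strategy : String) : Decidable (Pre_build_layer_dims input_dim base_dim output_dim n_layers strategy) := by unfold Pre_build_layer_dims; infer_instance

def pvWitness_build_layer_dims : Int × Int × Int × Int × String := (4, 32, 2, 3, "halve")

def Spec_build_layer_dims (input_dim : Int) (base_dim : Int) (output_dim : Int) (n_layers : Int) (strategy : String) (out : List Int) : Prop := out = build_layer_dims_alt input_dim base_dim output_dim n_layers strategy
instance (input_dim : Int) (base_dim : Int) (output_dim : Int) (n_layers : Int) (strategy : String) (out : List Int) : Decidable (Spec_build_layer_dims input_dim base_dim output_dim n_layers strategy out) := by unfold Spec_build_layer_dims; infer_instance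

-- ===== CLAIM (what is proved, stated in full; the proofs are below) =====
def Claim_equal_build_layer_dims : Prop := ∀ (input_dim : Int) (base_dim : Int) (output_dim : Int) (n_layers : Int) (strategy : String), Dom_build_layer_dims input_dim base_dim output_dim n_layers strategy → Pre_build_layer_dims input_dim base_dim output_dim n_layers strategy → Spec_build_layer_dims input_dim base_dim output_dim n_layers strategy (build_layer_dims input_dim base_dim output_dim n_layers strategy)

-- ===== LEMMAS AND PROOFS =====
-- A's loop body, as a named step function (identical to the one inside build_layer_dims)
def bld_step (strategy : String) (output_dim : Int) (st : List Int × Int) : List Int × Int :=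
  let dims := st.1 ++ [st.2]
  if strategy == "halve" then (dims, max (PySem.Int.floordiv st.2 2) output_dim)
  else if strategy == "double" then (dims, min (st.2 * 2) 1024)
  else if strategy == "constant" then (dims, st.2)
  else (dims, st.2)

-- loop invariant: folding A's step over any index list, then appending output_dim,
-- equals the accumulated dims followed by B's recursion from the current value
theorem bld_fold_eq (strategy : String) (output_dim : Int) (l : List Int) :
    ∀ (dims : List Int) (cur : Int),
      (l.foldl (fun st _ => bld_step strategy output_dim st) (dims, cur)).1 ++ [output_dim]
        = dims ++ bld_rest strategy output_dim cur l.length := by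
  induction l with
  | nil => intro dims cur; simp [bld_rest]
  | cons x xs ih =>
    intro dims cur
    simp only [List.foldl_cons, List.length_cons]
    rw [show (bld_step strategy output_dim (dims, cur))
          = (dims ++ [cur],
             if strategy == "halve" then max (PySem.Int.floordiv cur 2) output_dim
             else if strategy == "double" then min (cur * 2) 1024
             else if strategy == "constant" then cur else cur) from by
        simp only [bld_step]; split_ifs <;> rfl]
    rw [ih]
    simp [bld_rest]

-- ===== VERDICT (by name: the statement is the Claim_ definition above) =====
theorem build_layer_dims_spec : Claim_equal_build_layer_dims := by
  intro input_dim base_dim output_dim n_layers strategy _ _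
  unfold Spec_build_layer_dims build_layer_dims build_layer_dims_alt
  have h := bld_fold_eq strategy output_dim (PySem.List.pyRange 0 n_layers 1) [input_dim] base_dim
  simp only [bld_step] at h
  rw [PySem.List.length_pyRange_one] at h
  simpa [Int.toNat] using h
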